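-- pv_equiv track=rewrite | github.com/Maksym-Bondarenko/rppg-ethnicity-paper | ethnicity-gender-datasets.py | group_ethnicities
-- ===== SOURCE A (Python) =====
-- def group_ethnicities(mapping):
--     """
--     Classify each dataset into one of four categories:
--       1) Black & Latino (if text contains "black", "latino", or "native american")
--       2) Asian         (if text contains "asian")
--       3) White         (if text contains "white", "european", "caucasian")
--       4) Others        (anything else, including "n/a", "fitzpatrick", etc.)
--
--     IMPORTANT: The order of checks matters. If the string says "Black, White, Asian",
--                it will be assigned "Black & Latino" first, because we prioritize that
--                check below. Adjust the order to suit your exact grouping preference.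
--     """
--     grouped = []
--     for dataset, eth_str in mapping.items():
--         if not eth_str:
--             eth_str = "N/A"
--         lower_str = eth_str.lower()
--
--         # Priority #1: If it has 'black' or 'latino' or 'native american',
--         #     put it in the Black & Latino group.
--         if any(x in lower_str for x in ["black", "latino", "native american"]):
--             grouped.append({"Dataset": dataset, "Ethnicity": "Black & Latino"})
--
--         # Otherwise #2: If it has 'asian', label as 'Asian'
--         elif "asian" in lower_str:
--             grouped.append({"Dataset": dataset, "Ethnicity": "Asian"})
--
--         # Otherwise #3: If it has 'white', 'european', or 'caucasian', label as 'White'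
--         elif any(x in lower_str for x in ["white", "european", "caucasian"]):
--             grouped.append({"Dataset": dataset, "Ethnicity": "White"})
--
--         # Otherwise #4: everything else -> "Others"
--         else:
--             grouped.append({"Dataset": dataset, "Ethnicity": "Others"})
--
--     return grouped
-- ===== SOURCE B (Python) =====
-- # Staged overwrite passes: start with "Others" everywhere, then sweep the whole
-- # dataset once per rule in REVERSE priority; later (higher-priority) sweeps
-- # overwrite, so first-match priority emerges from overwrite order.
-- PASSES = [
--     (("white", "european", "caucasian"), "White"),
--     (("asian",), "Asian"),
--     (("black", "latino", "native american"), "Black & Latino"),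
-- ]
--
--
-- def group_ethnicities(mapping):
--     items = list(mapping.items())
--     labels = ["Others"] * len(items)
--     for keywords, label in PASSES:
--         for i, (_, eth) in enumerate(items):
--             if any(k in eth.lower() for k in keywords):
--                 labels[i] = label
--     return [{"Dataset": d, "Ethnicity": lab} for (d, _), lab in zip(items, labels)]
-- ===== Notes on version B (the rewrite author's own statement) =====
-- stated objective: alternative
-- what changed: Replaced the per-entry if/elif first-match chain by a staged-passes algorithm: a labels array initialized to 'Others' is overwritten by one whole-dataset sweep per rule in reverse priority order, so priority comes from overwrite order rather than branch order; the redundant falsy-to-'N/A' coercion is dropped (empty strings match no keyword either way).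
import Mathlib
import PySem

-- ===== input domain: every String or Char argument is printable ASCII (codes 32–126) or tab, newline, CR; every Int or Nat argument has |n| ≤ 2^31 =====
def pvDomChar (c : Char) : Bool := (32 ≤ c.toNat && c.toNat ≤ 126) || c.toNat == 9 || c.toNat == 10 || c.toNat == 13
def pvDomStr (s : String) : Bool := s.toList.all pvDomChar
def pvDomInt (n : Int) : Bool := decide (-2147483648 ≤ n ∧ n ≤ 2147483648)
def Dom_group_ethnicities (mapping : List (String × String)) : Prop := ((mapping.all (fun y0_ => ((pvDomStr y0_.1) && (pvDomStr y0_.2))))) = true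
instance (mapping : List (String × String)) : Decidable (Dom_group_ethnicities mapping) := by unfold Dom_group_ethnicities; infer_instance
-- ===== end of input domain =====

-- B replaces A's per-entry if/elif first-match chain by staged overwrite passes:
-- labels start as "Others" and one whole-dataset sweep per rule, in reverse priority
-- order, overwrites them, so priority comes from overwrite order (alternative decomposition).

-- ===== PORT A =====
def group_ethnicities (mapping : List (String × String)) : List (List (String × String)) :=
  (PySem.Dict.ofList mapping).items.foldl (fun grouped p =>
    let eth_str := if p.2 = "" then "N/A" else p.2
    let lower_str := PySem.Str.lower eth_str
    if ["black", "latino", "native american"].any (fun x => PySem.Str.isIn x lower_str) then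
      grouped ++ [[("Dataset", p.1), ("Ethnicity", "Black & Latino")]]
    else if PySem.Str.isIn "asian" lower_str then
      grouped ++ [[("Dataset", p.1), ("Ethnicity", "Asian")]]
    else if ["white", "european", "caucasian"].any (fun x => PySem.Str.isIn x lower_str) then
      grouped ++ [[("Dataset", p.1), ("Ethnicity", "White")]]
    else
      grouped ++ [[("Dataset", p.1), ("Ethnicity", "Others")]]) []

-- ===== PORT B =====
def pvPasses : List (List String × String) :=
  [(["white", "european", "caucasian"], "White"),
   (["asian"], "Asian"),
   (["black", "latino", "native american"], "Black & Latino")]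

-- the inner positional-update sweep: labels[i] := label where entry i matches
def pvSweep (items : List (String × String)) (labels : List String)
    (rule : List String × String) : List String :=
  (items.zip labels).map (fun q =>
    if rule.1.any (fun k => PySem.Str.isIn k (PySem.Str.lower q.1.2)) then rule.2 else q.2)

def group_ethnicities_alt (mapping : List (String × String)) : List (List (String × String)) :=
  let items := (PySem.Dict.ofList mapping).items
  let labels := pvPasses.foldl (pvSweep items) (items.map (fun _ => "Others"))
  (items.zip labels).map (fun q => [("Dataset", q.1.1), ("Ethnicity", q.2)])

-- ===== PRECONDITION & SPEC =====
def Spec_group_ethnicities (mapping : List (String × String)) (out : List (List (String × String))) : Prop := out = group_ethnicities_alt mapping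
instance (mapping : List (String × String)) (out : List (List (String × String))) : Decidable (Spec_group_ethnicities mapping out) := by unfold Spec_group_ethnicities; infer_instance

-- ===== CLAIM (what is proved, stated in full; the proofs are below) =====
def Claim_equal_group_ethnicities : Prop := ∀ (mapping : List (String × String)), Dom_group_ethnicities mapping → Spec_group_ethnicities mapping (group_ethnicities mapping)

-- ===== LEMMAS AND PROOFS =====

-- zipping a list with a pointwise map of itself collapses to a single map
theorem pv_zip_map_self {α β γ : Type} (l : List α) (f : α → β) (g : α × β → γ) :
    (l.zip (l.map f)).map g = l.map (fun p => g (p, f p)) := by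
  induction l with
  | nil => rfl
  | cons a t ih => simp [ih]

-- a sweep starting from a pointwise-mapped label list is again pointwise
theorem pv_sweep_map (items : List (String × String)) (f : String × String → String)
    (rule : List String × String) :
    pvSweep items (items.map f) rule
      = items.map (fun p =>
          if rule.1.any (fun k => PySem.Str.isIn k (PySem.Str.lower p.2)) then rule.2 else f p) := by
  unfold pvSweep
  exact pv_zip_map_self items f _

-- the final per-entry label of B's three passes
def pvFinal (p : String × String) : String :=
  if ["black", "latino", "native american"].any (fun k => PySem.Str.isIn k (PySem.Str.lower p.2)) then "Black & Latino"
  else if ["asian"].any (fun k => PySem.Str.isIn k (PySem.Str.lower p.2)) then "Asian"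
  else if ["white", "european", "caucasian"].any (fun k => PySem.Str.isIn k (PySem.Str.lower p.2)) then "White"
  else "Others"

theorem pv_labels_eq (items : List (String × String)) :
    pvPasses.foldl (pvSweep items) (items.map (fun _ => "Others")) = items.map pvFinal := by
  show pvSweep items (pvSweep items (pvSweep items (items.map fun _ => "Others") _) _) _ = _
  rw [pv_sweep_map, pv_sweep_map, pv_sweep_map]
  rfl

-- one loop step of A's fold appends exactly the item B produces for that pair
theorem pv_step_eq (acc : List (List (String × String))) (p : String × String) :
    (let eth_str := if p.2 = "" then "N/A" else p.2
     let lower_str := PySem.Str.lower eth_str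
     if ["black", "latino", "native american"].any (fun x => PySem.Str.isIn x lower_str) then
       acc ++ [[("Dataset", p.1), ("Ethnicity", "Black & Latino")]]
     else if PySem.Str.isIn "asian" lower_str then
       acc ++ [[("Dataset", p.1), ("Ethnicity", "Asian")]]
     else if ["white", "european", "caucasian"].any (fun x => PySem.Str.isIn x lower_str) then
       acc ++ [[("Dataset", p.1), ("Ethnicity", "White")]]
     else
       acc ++ [[("Dataset", p.1), ("Ethnicity", "Others")]])
    = acc ++ [[("Dataset", p.1), ("Ethnicity", pvFinal p)]] := by
  by_cases h : p.2 = ""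
  · simp only [h, reduceIte]
    rw [if_neg (by decide), if_neg (by decide), if_neg (by decide)]
    rw [show pvFinal p = "Others" from by unfold pvFinal; rw [h]; decide]
  · simp only [if_neg h, pvFinal, List.any_cons, List.any_nil, Bool.or_false]
    split_ifs <;> rfl

-- A's fold over any prefix state equals that state followed by B's items
theorem pv_foldl_eq (l : List (String × String)) (acc : List (List (String × String))) :
    l.foldl (fun grouped p =>
      let eth_str := if p.2 = "" then "N/A" else p.2
      let lower_str := PySem.Str.lower eth_str
      if ["black", "latino", "native american"].any (fun x => PySem.Str.isIn x lower_str) then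
        grouped ++ [[("Dataset", p.1), ("Ethnicity", "Black & Latino")]]
      else if PySem.Str.isIn "asian" lower_str then
        grouped ++ [[("Dataset", p.1), ("Ethnicity", "Asian")]]
      else if ["white", "european", "caucasian"].any (fun x => PySem.Str.isIn x lower_str) then
        grouped ++ [[("Dataset", p.1), ("Ethnicity", "White")]]
      else
        grouped ++ [[("Dataset", p.1), ("Ethnicity", "Others")]]) acc
    = acc ++ l.map (fun p => [("Dataset", p.1), ("Ethnicity", pvFinal p)]) := by
  induction l generalizing acc with
  | nil => simp
  | cons p t ih =>
    rw [List.foldl_cons, ih, pv_step_eq]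
    simp

-- ===== VERDICT (by name: the statement is the Claim_ definition above) =====
theorem group_ethnicities_spec : Claim_equal_group_ethnicities := by
  intro mapping _
  show group_ethnicities mapping = group_ethnicities_alt mapping
  unfold group_ethnicities group_ethnicities_alt
  rw [pv_foldl_eq]
  show _ = List.map _ (List.zip _ (List.foldl _ _ _))
  rw [pv_labels_eq, pv_zip_map_self]
  simp
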